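-- pv_equiv track=rewrite | github.com/arman1211/Python-practice | ass1p2goodseq.py | min_elements_to_remove
-- ===== SOURCE A (Python) =====
-- def min_elements_to_remove(N, a):
--     # Count occurrences of each element
--     counts = {}
--     for num in a:
--         counts[num] = counts.get(num, 0) + 1
--
--     # Calculate the number of elements to remove
--     removals = 0
--     for num, count in counts.items():
--         if count > num:
--             removals += count - num
--
--     return removals
-- ===== SOURCE B (Python) =====
-- def min_elements_to_remove(N, a):
--     total = 0
--     prev = None
--     run = 0
--     for x in sorted(a):
--         if prev is not None and x == prev:
--             run += 1
--         else:
--             if prev is not None and run > prev: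
--                 total += run - prev
--             prev = x
--             run = 1
--     if prev is not None and run > prev:
--         total += run - prev
--     return total
-- ===== Notes on version B (the rewrite author's own statement) =====
-- stated objective: alternative
-- what changed: B drops A's frequency dictionary entirely: it sorts the list once and makes a single pass over the sorted sequence, grouping equal elements into runs and adding max(0, run_length - value) whenever the value changes (and at the end).
import Mathlib
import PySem

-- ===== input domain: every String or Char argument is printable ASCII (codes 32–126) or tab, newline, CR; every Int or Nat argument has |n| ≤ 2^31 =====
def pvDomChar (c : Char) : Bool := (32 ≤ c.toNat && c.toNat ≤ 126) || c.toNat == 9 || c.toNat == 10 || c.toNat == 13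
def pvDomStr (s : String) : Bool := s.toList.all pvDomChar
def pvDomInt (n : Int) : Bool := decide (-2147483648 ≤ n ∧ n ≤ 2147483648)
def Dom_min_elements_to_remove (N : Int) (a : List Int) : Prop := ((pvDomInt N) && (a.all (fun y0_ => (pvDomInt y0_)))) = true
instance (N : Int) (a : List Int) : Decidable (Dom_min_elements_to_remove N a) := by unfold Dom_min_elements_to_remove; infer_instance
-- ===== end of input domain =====

-- B replaces A's frequency dict with a single pass over sorted(a) that groups equal
-- elements into runs and flushes max(0, run - value) at each value change (objective: alternative).

-- ===== PORT A =====
def min_elements_to_remove (N : Int) (a : List Int) : Int :=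
  let counts := a.foldl (fun d num => d.insert num (d.getD num 0 + 1)) PySem.Dict.empty
  counts.items.foldl (fun removals p => if p.2 > p.1 then removals + (p.2 - p.1) else removals) 0

-- ===== PORT B =====
-- loop body of Source B's for-loop: state (total, prev, run)
def bStep (st : Int × Option Int × Int) (x : Int) : Int × Option Int × Int :=
  match st with
  | (total, prev, run) =>
    match prev with
    | some p =>
      if x = p then (total, some p, run + 1)
      else ((if run > p then total + (run - p) else total), some x, 1)
    | none => (total, some x, 1)

-- final flush after the loop
def bFin (st : Int × Option Int × Int) : Int :=
  match st with
  | (total, some p, run) => if run > p then total + (run - p) else total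
  | (total, none, _) => total

def min_elements_to_remove_alt (N : Int) (a : List Int) : Int :=
  bFin ((PySem.List.sorted a (fun x => x) false).foldl bStep (0, none, 0))

-- ===== PRECONDITION & SPEC =====
def Spec_min_elements_to_remove (N : Int) (a : List Int) (out : Int) : Prop := out = min_elements_to_remove_alt N a
instance (N : Int) (a : List Int) (out : Int) : Decidable (Spec_min_elements_to_remove N a out) := by unfold Spec_min_elements_to_remove; infer_instance

-- ===== CLAIM (what is proved, stated in full; the proofs are below) =====
def Claim_equal_min_elements_to_remove : Prop := ∀ (N : Int) (a : List Int), Dom_min_elements_to_remove N a → Spec_min_elements_to_remove N a (min_elements_to_remove N a)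

-- ===== LEMMAS AND PROOFS =====

-- max(0, c - k): removals contributed by a value k occurring c times
def m0 (c k : Int) : Int := if c > k then c - k else 0

-- canonical removal count, by recursion on the distinct values of the list
def S : List Int → Int
  | [] => 0
  | v :: l => m0 ((l.count v : Int) + 1) v + S (l.filter (fun y => decide (y ≠ v)))
termination_by l => l.length
decreasing_by simpa using le_trans (List.length_filter_le _ _) (le_of_eq (List.length_attach (l := l)))

lemma S_cons (v : Int) (l : List Int) :
    S (v :: l) = m0 ((l.count v : Int) + 1) v + S (l.filter (fun y => decide (y ≠ v))) := by
  rw [S]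

-- the m0-sum over ANY duplicate-free enumeration d of l's values is S l
lemma sum_m0_eq_S_aux (n : Nat) : ∀ (l d : List Int), l.length ≤ n → d.Nodup → (∀ x, x ∈ d ↔ x ∈ l) →
    (d.map (fun k => m0 ((l.count k : Int)) k)).sum = S l := by
  induction n with
  | zero =>
    intro l d hn hnd hm
    have : l = [] := List.eq_nil_of_length_eq_zero (Nat.le_zero.1 hn)
    subst this
    have : d = [] := List.eq_nil_iff_forall_not_mem.mpr (fun x hx => by simpa using (hm x).1 hx)
    simp [this, S]
  | succ n ih =>
    intro l d hn hnd hm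
    match l with
    | [] =>
      have : d = [] := List.eq_nil_iff_forall_not_mem.mpr (fun x hx => by simpa using (hm x).1 hx)
      simp [this, S]
    | v :: l =>
      have hv : v ∈ d := (hm v).2 List.mem_cons_self
      have hperm : List.Perm d (v :: d.erase v) := List.perm_cons_erase hv
      rw [(hperm.map _).sum_eq]
      have hcount : ∀ k ∈ d.erase v,
          (fun k => m0 (((v :: l).count k : Int)) k) k
            = (fun k => m0 (((l.filter (fun y => decide (y ≠ v))).count k : Int)) k) k := by
        intro k hk
        have hkv : k ≠ v := ((List.Nodup.mem_erase_iff hnd).1 hk).1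
        simp only
        have h1 : (v :: l).count k = l.count k := by simp [Ne.symm hkv]
        rw [h1, List.count_filter (by simpa using hkv)]
      rw [List.map_cons, List.sum_cons, List.map_congr_left hcount,
          ih (l.filter (fun y => decide (y ≠ v))) (d.erase v)
            (le_trans (List.length_filter_le _ _) (Nat.le_of_succ_le_succ hn))
            (hnd.erase v) ?_]
      · rw [S_cons]
        simp [List.count_cons_self]
      · intro x
        rw [List.Nodup.mem_erase_iff hnd, hm x]
        simp only [List.mem_cons, List.mem_filter]
        constructor
        · rintro ⟨hne, h | h⟩
          · exact absurd h hne
          · exact ⟨h, by simpa using hne⟩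
        · rintro ⟨h, hne⟩
          exact ⟨by simpa using hne, Or.inr h⟩

lemma sum_m0_eq_S (l d : List Int) (hnd : d.Nodup) (hm : ∀ x, x ∈ d ↔ x ∈ l) :
    (d.map (fun k => m0 ((l.count k : Int)) k)).sum = S l :=
  sum_m0_eq_S_aux l.length l d le_rfl hnd hm

-- A's items-fold is a sum of m0 terms
lemma foldl_if_add (ps : List (Int × Int)) (t : Int) :
    ps.foldl (fun r p => if p.2 > p.1 then r + (p.2 - p.1) else r) t
      = t + (ps.map (fun p => m0 p.2 p.1)).sum := by
  induction ps generalizing t with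
  | nil => simp
  | cons p ps ih =>
    simp only [List.foldl_cons, List.map_cons, List.sum_cons, ih, m0]
    split_ifs <;> ring

lemma A_eq (N : Int) (a : List Int) :
    min_elements_to_remove N a
      = ((PySem.Set.ofList a).map (fun k => m0 ((a.count k : Int)) k)).sum := by
  show (PySem.Dict.items _).foldl _ 0 = _
  rw [PySem.Dict.foldl_insert_getD_add_one_eq_counter, PySem.Dict.items_counter,
      foldl_if_add, List.map_map, zero_add]
  rfl

-- B's scan invariant: on a sorted suffix whose elements all exceed/equal p, the open
-- run (p, r) plus the remaining occurrences of p flush to m0, and the rest scans to S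
lemma scan_invariant (l : List Int) : ∀ (t p r : Int), l.Pairwise (· ≤ ·) → (∀ x ∈ l, p ≤ x) →
    bFin (l.foldl bStep (t, some p, r))
      = t + m0 (r + (l.count p : Int)) p + S (l.filter (fun y => decide (y ≠ p))) := by
  induction l with
  | nil =>
    intro t p r _ _
    simp only [List.foldl_nil, List.count_nil, List.filter_nil, bFin, m0, S]
    split_ifs <;> omega
  | cons x l ih =>
    intro t p r hpw hle
    have hpwl := hpw.of_cons
    have hxle : ∀ y ∈ l, x ≤ y := fun y hy => (List.pairwise_cons.1 hpw).1 y hy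
    by_cases hx : x = p
    · subst hx
      have hstep : bStep (t, some x, r) x = (t, some x, r + 1) := by simp [bStep]
      rw [List.foldl_cons, hstep, ih t x (r + 1) hpwl (fun y hy => hle y (List.mem_cons_of_mem _ hy))]
      have h1 : ((x :: l).count x : Int) = (l.count x : Int) + 1 := by
        simp [List.count_cons_self]
      have h2 : (x :: l).filter (fun y => decide (y ≠ x)) = l.filter (fun y => decide (y ≠ x)) := by
        simp
      rw [h1, h2]
      have : r + 1 + (l.count x : Int) = r + ((l.count x : Int) + 1) := by ring
      rw [this]
    · have hpx : p < x := lt_of_le_of_ne (hle x List.mem_cons_self) (Ne.symm hx)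
      have hpnotl : p ∉ l := fun hp => absurd (hxle p hp) (by omega)
      have hstep : bStep (t, some p, r) x = (t + m0 r p, some x, 1) := by
        simp only [bStep, if_neg hx, m0]
        split_ifs <;> simp
      rw [List.foldl_cons, hstep, ih (t + m0 r p) x 1 hpwl hxle]
      have hc : ((x :: l).count p : Int) = 0 := by
        simp [hx, List.count_eq_zero.2 hpnotl]
      have hf : (x :: l).filter (fun y => decide (y ≠ p)) = x :: l := by
        simp only [List.filter_cons]
        rw [if_pos (by simpa using hx)]
        congr 1
        exact List.filter_eq_self.2
          (fun y hy => decide_eq_true (fun hyp : y = p => hpnotl (hyp ▸ hy)))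
      rw [hc, hf, S_cons]
      have h3 : r + 0 = r := by ring
      have h4 : (1 : Int) + (l.count x : Int) = (l.count x : Int) + 1 := by ring
      rw [h3, h4]
      ring

lemma scan_from_start (l : List Int) (t : Int) (hpw : l.Pairwise (· ≤ ·)) :
    bFin (l.foldl bStep (t, none, 0)) = t + S l := by
  match l with
  | [] => simp [bFin, S]
  | x :: l =>
    have hstep : bStep (t, none, 0) x = (t, some x, 1) := by simp [bStep]
    rw [List.foldl_cons, hstep,
      scan_invariant l t x 1 hpw.of_cons (fun y hy => (List.pairwise_cons.1 hpw).1 y hy), S_cons]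
    ring_nf

lemma B_eq (N : Int) (a : List Int) :
    min_elements_to_remove_alt N a = S (PySem.List.sorted a (fun x => x) false) := by
  show bFin _ = _
  rw [scan_from_start _ 0 (PySem.List.sorted_pairwise a (fun x => x)), zero_add]

-- ===== VERDICT (by name: the statement is the Claim_ definition above) =====
theorem min_elements_to_remove_spec : Claim_equal_min_elements_to_remove := by
  intro N a _
  show _ = _
  rw [A_eq, B_eq,
      ← sum_m0_eq_S (PySem.List.sorted a (fun x => x) false) (PySem.Set.ofList a)
        (PySem.Set.nodup_ofList a)
        (fun x => (PySem.Set.mem_ofList a x).trans (PySem.List.mem_sorted a (fun x => x) false x).symm)]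
  refine congrArg List.sum (List.map_congr_left ?_)
  intro k _
  rw [(PySem.List.sorted_perm a (fun x => x) false).count_eq]
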